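-- pv_equiv track=rewrite | github.com/jwnng/My-Algorithm-Study | Programmers/Kit/Stack_Queue/Level_2_기능개발.py | solution
-- ===== SOURCE A (Python) =====
-- from collections import deque
--
-- def solution(progresses, speeds):
--     answer = []
--
--     complete_days = deque()
--     complete = []
--     for p,s in zip(progresses,speeds):
--         days = 0
--         while p < 100:
--             days += 1
--             p += s
--         complete_days.append(days)
--     # 5,10,1,1,20,1 -> 1,3,2
--     # 일수를 앞 인덱스부터 비교해서 cnt로 관리하면 됌
--
--     while complete_days:
--         deploy_day = complete_days.popleft()
--         cnt = 1
--
--         while complete_days and complete_days[0] <= deploy_day: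
--             complete_days.popleft()
--             cnt += 1
--
--         answer.append(cnt)
--
--     return answer
-- ===== SOURCE B (Python) =====
-- def solution(progresses, speeds):
--     ans = []
--     cur = 0
--     for p, s in zip(progresses, speeds):
--         d = 0 if p >= 100 else -((p - 100) // s)  # ceil((100-p)/s)
--         if ans and d <= cur:
--             ans[-1] += 1
--         else:
--             cur = d
--             ans.append(1)
--     return ans
-- ===== Notes on version B (the rewrite author's own statement) =====
-- stated objective: simpler
-- what changed: B computes each feature's completion day with a closed-form ceiling division instead of A's repeated-addition while loop, and merges day computation and batch grouping into one single forward pass with a running threshold, instead of A's two phases over a deque.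
import Mathlib
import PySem

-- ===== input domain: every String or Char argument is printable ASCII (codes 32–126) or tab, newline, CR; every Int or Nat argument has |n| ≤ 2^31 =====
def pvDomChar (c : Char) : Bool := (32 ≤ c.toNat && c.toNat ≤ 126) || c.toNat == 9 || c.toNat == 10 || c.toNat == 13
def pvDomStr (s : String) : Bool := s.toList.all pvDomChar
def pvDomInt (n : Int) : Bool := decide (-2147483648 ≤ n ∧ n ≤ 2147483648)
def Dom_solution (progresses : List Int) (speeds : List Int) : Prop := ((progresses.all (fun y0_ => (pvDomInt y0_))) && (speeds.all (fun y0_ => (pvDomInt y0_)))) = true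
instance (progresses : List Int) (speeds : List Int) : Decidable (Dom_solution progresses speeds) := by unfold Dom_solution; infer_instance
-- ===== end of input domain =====

-- B changes A's repeated-addition day loop into a closed-form ceiling division and fuses
-- day computation and batch grouping into one forward pass (objective: simpler).

-- ===== PORT A =====
-- the inner 'while p < 100: days += 1; p += s'; the '0 < s' test is only a totality
-- guard: when s ≤ 0 and p < 100 the Python loop diverges (excluded by Pre_solution)
def daysA (p s : Int) : Int :=
  if _h : p < 100 then (if 0 < s then 1 + daysA (p + s) s else 0) else 0
termination_by (100 - p).toNat
decreasing_by omega

-- the inner 'while complete_days and complete_days[0] <= deploy_day' loop: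
-- returns (number of popped elements, remaining deque)
def takeCnt (d : Int) : List Int → Int × List Int
  | [] => (0, [])
  | x :: xs => if x ≤ d then let r := takeCnt d xs; (r.1 + 1, r.2) else (0, x :: xs)

theorem takeCnt_len (d : Int) (l : List Int) : (takeCnt d l).2.length ≤ l.length := by
  induction l with
  | nil => simp [takeCnt]
  | cons x xs ih =>
    simp only [takeCnt]
    split
    · simpa using Nat.le_succ_of_le ih
    · simp

-- the outer 'while complete_days' loop
def groupA : List Int → List Int
  | [] => []
  | d :: rest =>
    let r := takeCnt d rest
    (1 + r.1) :: groupA r.2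
termination_by l => l.length
decreasing_by simpa using Nat.lt_succ_of_le (takeCnt_len d rest)

def solution (progresses : List Int) (speeds : List Int) : List Int :=
  let complete_days :=
    (progresses.zip speeds).foldl (fun acc ps => acc ++ [daysA ps.1 ps.2]) []
  groupA complete_days

-- ===== PORT B =====
-- loop body of B: state is (ans reversed, cur)
def stepB (st : List Int × Int) (ps : Int × Int) : List Int × Int :=
  let d := if ps.1 ≥ 100 then 0 else -(PySem.Int.floordiv (ps.1 - 100) ps.2)
  match st.1 with
  | [] => ([1], d)
  | a :: rest => if d ≤ st.2 then ((a + 1) :: rest, st.2) else (1 :: a :: rest, d)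

def solution_alt (progresses : List Int) (speeds : List Int) : List Int :=
  ((progresses.zip speeds).foldl stepB ([], 0)).1.reverse

-- ===== PRECONDITION & SPEC =====
-- Pre_ excludes pairs with p < 100 and s ≤ 0: there A's inner while loop never
-- terminates (s = 0 or negative speed), so A returns on exactly the inputs admitted.
def Pre_solution (progresses : List Int) (speeds : List Int) : Prop :=
  ∀ ps ∈ progresses.zip speeds, 100 ≤ ps.1 ∨ 0 < ps.2
instance (progresses : List Int) (speeds : List Int) : Decidable (Pre_solution progresses speeds) := by unfold Pre_solution; infer_instance
def pvWitness_solution : List Int × List Int := ([93, 30, 55, 100], [1, 30, 5, 1])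

def Spec_solution (progresses : List Int) (speeds : List Int) (out : List Int) : Prop := out = solution_alt progresses speeds
instance (progresses : List Int) (speeds : List Int) (out : List Int) : Decidable (Spec_solution progresses speeds out) := by unfold Spec_solution; infer_instance

-- ===== CLAIM (what is proved, stated in full; the proofs are below) =====
def Claim_equal_solution : Prop := ∀ (progresses : List Int) (speeds : List Int), Dom_solution progresses speeds → Pre_solution progresses speeds → Spec_solution progresses speeds (solution progresses speeds)

-- ===== LEMMAS AND PROOFS =====

-- B's closed-form day count
def dB (p s : Int) : Int := if p ≥ 100 then 0 else -(PySem.Int.floordiv (p - 100) s)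

-- closed form = loop count, for terminating pairs
theorem daysA_eq_dB (p s : Int) (hs : 100 ≤ p ∨ 0 < s) : daysA p s = dB p s := by
  rcases hs with h | hs
  · rw [daysA, dif_neg (not_lt.mpr h), dB, if_pos h]
  · induction hn : (100 - p).toNat using Nat.strong_induction_on generalizing p with
    | _ n ih =>
      by_cases hp : p < 100
      · rw [daysA, dif_pos hp, if_pos hs]
        have hrec : daysA (p + s) s = dB (p + s) s := by
          rcases Nat.lt_or_ge 0 n with hn0 | hn0
          · exact ih (100 - (p + s)).toNat (by omega) (p + s) rfl
          · omega
        rw [hrec]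
        simp only [dB]
        rw [if_neg (by omega : ¬ p ≥ 100)]
        by_cases hps : p + s ≥ 100
        · rw [if_pos hps]
          have hf : PySem.Int.floordiv (p - 100) s = -1 :=
            (PySem.Int.floordiv_eq_iff_of_pos hs).mpr ⟨by nlinarith, by nlinarith⟩
          omega
        · rw [if_neg hps]
          have h1 : PySem.Int.floordiv (p - 100) s =
              PySem.Int.floordiv (p + s - 100) s - 1 := by
            have hb : PySem.Int.floordiv (p + s - 100) s * s + PySem.Int.mod (p + s - 100) s = p + s - 100 :=
              PySem.Int.floordiv_mul_add_mod _ _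
            have hm0 : 0 ≤ PySem.Int.mod (p + s - 100) s := PySem.Int.mod_nonneg (p + s - 100) hs
            have hm1 : PySem.Int.mod (p + s - 100) s < s := PySem.Int.mod_lt (p + s - 100) hs
            exact (PySem.Int.floordiv_eq_iff_of_pos hs).mpr ⟨by nlinarith, by nlinarith⟩
          rw [h1]; ring
      · rw [daysA, dif_neg hp, dB, if_pos (by omega : p ≥ 100)]

-- phase 1 of A builds the map of daysA over the zipped list
theorem phase1_eq (l : List (Int × Int)) (acc : List Int) :
    l.foldl (fun acc ps => acc ++ [daysA ps.1 ps.2]) acc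
      = acc ++ l.map (fun ps => daysA ps.1 ps.2) := by
  induction l generalizing acc with
  | nil => simp
  | cons x xs ih => simp [List.foldl_cons, ih]

-- B's fold over pairs = B's grouping fold over the dB-days list
def stepB' (st : List Int × Int) (d : Int) : List Int × Int :=
  match st.1 with
  | [] => ([1], d)
  | a :: rest => if d ≤ st.2 then ((a + 1) :: rest, st.2) else (1 :: a :: rest, d)

theorem stepB_eq (st : List Int × Int) (ps : Int × Int) :
    stepB st ps = stepB' st (dB ps.1 ps.2) := by
  cases st; rfl

theorem foldB_eq (l : List (Int × Int)) (st : List Int × Int) :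
    l.foldl stepB st = (l.map (fun ps => dB ps.1 ps.2)).foldl stepB' st := by
  induction l generalizing st with
  | nil => rfl
  | cons x xs ih => simp [List.foldl_cons, stepB_eq, ih]

-- core invariant: the grouping fold with an open group (count a, threshold cur)
-- first absorbs takeCnt cur l, then continues as groupA
theorem foldB'_inv (l : List Int) (a : Int) (acc : List Int) (cur : Int) :
    (l.foldl stepB' (a :: acc, cur)).1.reverse
      = acc.reverse ++ ((a + (takeCnt cur l).1) :: groupA (takeCnt cur l).2) := by
  induction l generalizing a acc cur with
  | nil => simp [takeCnt, groupA]
  | cons x xs ih =>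
    by_cases hx : x ≤ cur
    · have : stepB' (a :: acc, cur) x = ((a + 1) :: acc, cur) := by simp [stepB', hx]
      simp only [List.foldl_cons, this, ih, takeCnt, hx, if_true]
      have : a + 1 + (takeCnt cur xs).1 = a + ((takeCnt cur xs).1 + 1) := by ring
      rw [this]
    · have : stepB' (a :: acc, cur) x = (1 :: a :: acc, x) := by simp [stepB', hx]
      simp only [List.foldl_cons, this, ih, takeCnt, hx, if_false]
      rw [groupA]
      simp

theorem foldB'_eq_groupA (l : List Int) :
    (l.foldl stepB' ([], 0)).1.reverse = groupA l := by
  cases l with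
  | nil => simp [groupA]
  | cons x xs =>
    have : stepB' (([] : List Int), 0) x = ([1], x) := rfl
    rw [List.foldl_cons, this, foldB'_inv, groupA]
    simp

theorem map_days_eq (l : List (Int × Int)) (h : ∀ ps ∈ l, 100 ≤ ps.1 ∨ 0 < ps.2) :
    l.map (fun ps => daysA ps.1 ps.2) = l.map (fun ps => dB ps.1 ps.2) := by
  apply List.map_congr_left
  intro ps hps
  exact daysA_eq_dB ps.1 ps.2 (h ps hps)

-- ===== VERDICT (by name: the statement is the Claim_ definition above) =====
theorem solution_spec : Claim_equal_solution := by
  intro progresses speeds _hdom hpre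
  unfold Spec_solution solution solution_alt
  rw [phase1_eq, foldB_eq, foldB'_eq_groupA, List.nil_append,
    map_days_eq _ hpre]
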